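-- pv_equiv track=rewrite | github.com/laryziinha/forge-scryfall-scrapper | src/DToken.py | preview_items_vs_scryfall
-- ===== SOURCE A (Python) =====
-- def preview_items_vs_scryfall(items_dict: dict, cards: list):
--     """Return (available, missing_list, by_collector_map) for preview."""
--     by_collector = {}
--     for c in cards:
--         cnum_raw = str(c.get("collector_number", "0"))
--         try:
--             cnum = int(cnum_raw.split("★")[0])
--         except Exception:
--             continue
--         by_collector[cnum] = c
--
--     available = 0
--     missing = []
--     for collector in sorted(items_dict.keys()):
--         if collector in by_collector:
--             available += 1
--         else:
--             missing.append(collector)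
--     return available, missing, by_collector
-- ===== SOURCE B (Python) =====
-- def _collector_num(c):
--     """Collector number of one card, or None when it does not parse."""
--     try:
--         return int(str(c.get("collector_number", "0")).split("\u2605")[0])
--     except Exception:
--         return None
--
--
-- def preview_items_vs_scryfall(items_dict: dict, cards: list):
--     """Return (available, missing_list, by_collector_map) for preview."""
--     by_collector = {n: c for c in cards if (n := _collector_num(c)) is not None}
--     # Two-pointer merge: walk the sorted item keys and the sorted card keys
--     # in lockstep instead of testing each item key for dict membership.
--     have = iter(sorted(by_collector))
--     nxt = next(have, None)
--     available = 0
--     missing = []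
--     for k in sorted(items_dict):
--         while nxt is not None and nxt < k:
--             nxt = next(have, None)
--         if nxt == k:
--             available += 1
--         else:
--             missing.append(k)
--     return available, missing, by_collector
-- ===== Notes on version B (the rewrite author's own statement) =====
-- stated objective: alternative
-- what changed: Instead of testing each sorted item key for membership in the by_collector dict, B sorts the card keys too and runs a two-pointer merge scan of the two sorted key sequences (advancing an iterator of card keys past smaller keys, counting matches, collecting gaps); by_collector itself is built by a dict comprehension over a parsing helper.
import Mathlib
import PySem

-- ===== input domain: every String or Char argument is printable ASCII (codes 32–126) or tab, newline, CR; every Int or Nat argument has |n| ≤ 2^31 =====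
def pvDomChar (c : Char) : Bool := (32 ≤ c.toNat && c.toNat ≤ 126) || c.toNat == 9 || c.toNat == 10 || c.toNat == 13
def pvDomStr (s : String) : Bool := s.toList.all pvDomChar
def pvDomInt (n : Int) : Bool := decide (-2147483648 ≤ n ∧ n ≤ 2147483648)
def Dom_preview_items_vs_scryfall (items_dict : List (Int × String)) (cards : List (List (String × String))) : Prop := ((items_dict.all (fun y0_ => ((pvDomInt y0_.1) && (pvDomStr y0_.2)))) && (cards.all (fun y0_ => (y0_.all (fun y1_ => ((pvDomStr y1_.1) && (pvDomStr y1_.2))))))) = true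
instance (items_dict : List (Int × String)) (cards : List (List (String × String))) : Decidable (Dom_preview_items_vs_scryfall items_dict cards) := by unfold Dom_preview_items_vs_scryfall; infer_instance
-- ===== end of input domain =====

-- B replaces A's per-key dict-membership loop by a two-pointer merge scan of the two
-- sorted key sequences (item keys vs card collector numbers); objective: alternative.

-- ===== PORT A =====
def preview_items_vs_scryfall (items_dict : List (Int × String)) (cards : List (List (String × String))) : Int × List Int × (List (Int × List (String × String))) :=
  let by_collector : PySem.Dict Int (List (String × String)) :=
    cards.foldl (fun d c =>
      let cnum_raw := PySem.Dict.getD (PySem.Dict.mk c) "collector_number" "0"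
      -- try: cnum = int(cnum_raw.split("★")[0]); except: continue  (none = any exception)
      match (PySem.Str.split? cnum_raw "★").bind
              (fun parts => (PySem.List.pyGet? parts 0).bind PySem.Int.ofStr?) with
      | none => d
      | some cnum => d.insert cnum c) PySem.Dict.empty
  let r := (PySem.List.sorted (items_dict.map Prod.fst) (fun k => k)).foldl
      (fun (p : Int × List Int) collector =>
        if by_collector.contains collector then (p.1 + 1, p.2) else (p.1, p.2 ++ [collector]))
      ((0 : Int), ([] : List Int))
  (r.1, r.2, by_collector.items)

-- ===== PORT B =====
-- helper _collector_num(c): parsed collector number or None (None = any exception)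
def pvCollectorNum (c : List (String × String)) : Option Int :=
  (PySem.Str.split? (PySem.Dict.getD (PySem.Dict.mk c) "collector_number" "0") "★").bind
    (fun parts => (PySem.List.pyGet? parts 0).bind PySem.Int.ofStr?)

-- nxt = next(it, None) on a list-backed iterator: first element and the remaining elements
def pvNext (l : List Int) : Option Int × List Int :=
  match l with
  | [] => (none, [])
  | x :: r => (some x, r)

-- while nxt is not None and nxt < k: nxt = next(have, None)
def pvSkipLt (k : Int) (nxt : Option Int) (rest : List Int) : Option Int × List Int :=
  match nxt with
  | none => (none, rest)
  | some x =>
    if x < k then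
      match rest with
      | [] => (none, [])
      | y :: r => pvSkipLt k (some y) r
    else (some x, rest)

-- loop body: advance the card-key iterator, then count a match or record a gap
def pvStep (s : (Int × List Int) × (Option Int × List Int)) (k : Int) :
    (Int × List Int) × (Option Int × List Int) :=
  let it := pvSkipLt k s.2.1 s.2.2
  if it.1 == some k then ((s.1.1 + 1, s.1.2), it)
  else ((s.1.1, s.1.2 ++ [k]), it)

def preview_items_vs_scryfall_alt (items_dict : List (Int × String)) (cards : List (List (String × String))) : Int × List Int × (List (Int × List (String × String))) :=
  let by_collector : PySem.Dict Int (List (String × String)) :=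
    (cards.filterMap (fun c => (pvCollectorNum c).map (fun n => (n, c)))).foldl
      (fun d p => d.insert p.1 p.2) PySem.Dict.empty
  let st := (PySem.List.sorted (items_dict.map Prod.fst) (fun k => k)).foldl pvStep
      (((0 : Int), ([] : List Int)), pvNext (PySem.List.sorted by_collector.keys (fun k => k)))
  (st.1.1, st.1.2, by_collector.items)

-- ===== PRECONDITION & SPEC =====
-- Pre_ only requires the items_dict association list to have pairwise-distinct keys: a Python
-- dict always does, so no input the Python function accepts is excluded (duplicate-key lists
-- do not represent a dict under the type convention).
def Pre_preview_items_vs_scryfall (items_dict : List (Int × String)) (cards : List (List (String × String))) : Prop :=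
  (items_dict.map Prod.fst).Nodup
instance (items_dict : List (Int × String)) (cards : List (List (String × String))) : Decidable (Pre_preview_items_vs_scryfall items_dict cards) := by unfold Pre_preview_items_vs_scryfall; infer_instance

def pvWitness_preview_items_vs_scryfall : (List (Int × String)) × (List (List (String × String))) :=
  ([(1, "Foo"), (2, "Bar")], [[("collector_number", "1")], [("name", "x")]])

def Spec_preview_items_vs_scryfall (items_dict : List (Int × String)) (cards : List (List (String × String))) (out : Int × List Int × (List (Int × List (String × String)))) : Prop := out = preview_items_vs_scryfall_alt items_dict cards
instance (items_dict : List (Int × String)) (cards : List (List (String × String))) (out : Int × List Int × (List (Int × List (String × String)))) : Decidable (Spec_preview_items_vs_scryfall items_dict cards out) := by unfold Spec_preview_items_vs_scryfall; infer_instance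

-- ===== CLAIM (what is proved, stated in full; the proofs are below) =====
def Claim_equal_preview_items_vs_scryfall : Prop := ∀ (items_dict : List (Int × String)) (cards : List (List (String × String))), Dom_preview_items_vs_scryfall items_dict cards → Pre_preview_items_vs_scryfall items_dict cards → Spec_preview_items_vs_scryfall items_dict cards (preview_items_vs_scryfall items_dict cards)

-- ===== LEMMAS AND PROOFS =====

-- the two by_collector builds produce the same Dict
theorem pvBuild_eq (cards : List (List (String × String))) (d : PySem.Dict Int (List (String × String))) :
    cards.foldl (fun d c =>
      let cnum_raw := PySem.Dict.getD (PySem.Dict.mk c) "collector_number" "0"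
      match (PySem.Str.split? cnum_raw "★").bind
              (fun parts => (PySem.List.pyGet? parts 0).bind PySem.Int.ofStr?) with
      | none => d
      | some cnum => d.insert cnum c) d
    = (cards.filterMap (fun c => (pvCollectorNum c).map (fun n => (n, c)))).foldl
        (fun d p => d.insert p.1 p.2) d := by
  induction cards generalizing d with
  | nil => rfl
  | cons c cs ih =>
    simp only [List.foldl_cons, List.filterMap_cons]
    cases h : pvCollectorNum c with
    | none => simp only [pvCollectorNum] at h; rw [h]; exact ih d
    | some n =>
      simp only [pvCollectorNum] at h
      rw [h]
      simp only [Option.map_some, List.foldl_cons]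
      exact ih _

-- A's counting loop, in closed form
theorem pvPairFold (q : Int → Bool) (l : List Int) (a : Int) (m : List Int) :
    l.foldl (fun (p : Int × List Int) k =>
        if q k then (p.1 + 1, p.2) else (p.1, p.2 ++ [k])) (a, m)
    = (a + (l.countP q : Int), m ++ l.filter (fun k => !q k)) := by
  induction l generalizing a m with
  | nil => simp
  | cons x xs ih =>
    by_cases h : q x = true
    · simp [h, ih]
      ring
    · simp [h, ih]

-- the skip loop, as a dropWhile on the list behind the iterator
theorem pvSkipLt_toIter (l : List Int) (k : Int) :
    pvSkipLt k (pvNext l).1 (pvNext l).2 = pvNext (l.dropWhile (fun x => decide (x < k))) := by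
  induction l with
  | nil => rfl
  | cons x r ih =>
    show pvSkipLt k (some x) r = pvNext ((x :: r).dropWhile (fun x => decide (x < k)))
    rw [List.dropWhile_cons, pvSkipLt.eq_def]
    by_cases h : x < k
    · simp only [h, decide_true, if_pos]
      cases r with
      | nil => rfl
      | cons y r' => exact ih
    · simp only [h, decide_false]
      rfl

-- head of the dropped list detects membership, on a strictly increasing list
theorem pvHead_dropWhile (l : List Int) (hl : l.Pairwise (· < ·)) (k : Int) :
    ((l.dropWhile (fun x => decide (x < k))).head? = some k) ↔ k ∈ l := by
  induction l with
  | nil => simp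
  | cons x r ih =>
    have hr := (List.pairwise_cons.mp hl).2
    have hx := (List.pairwise_cons.mp hl).1
    simp only [List.dropWhile_cons]
    by_cases h : x < k
    · simp only [h, decide_true, if_pos, ih hr, List.mem_cons]
      constructor
      · exact Or.inr
      · rintro (rfl | hm)
        · omega
        · exact hm
    · simp only [h, decide_false, if_neg, Bool.false_eq_true, not_false_iff, List.head?_cons,
        Option.some.injEq, List.mem_cons]
      constructor
      · exact fun e => Or.inl e.symm
      · rintro (rfl | hm)
        · rfl
        · exact absurd (hx k hm) (by omega)

-- dropping keys below k does not change membership of larger keys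
theorem pvMem_dropWhile (l : List Int) (k k' : Int) (hk : k < k') :
    (k' ∈ l.dropWhile (fun x => decide (x < k))) ↔ k' ∈ l := by
  constructor
  · exact fun h => (List.dropWhile_sublist _).mem h
  · intro h
    rw [← List.takeWhile_append_dropWhile (p := fun x => decide (x < k)) (l := l),
        List.mem_append] at h
    rcases h with h | h
    · have := List.mem_takeWhile_imp h
      simp at this
      omega
    · exact h

-- B's merge scan, in closed form (same shape as pvPairFold's right-hand side)
theorem pvScan (ws : List Int) (l : List Int) (a : Int) (m : List Int)
    (hw : ws.Pairwise (· < ·)) (hl : l.Pairwise (· < ·)) :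
    (ws.foldl pvStep ((a, m), pvNext l)).1
      = (a + (ws.countP (fun k => decide (k ∈ l)) : Int),
         m ++ ws.filter (fun k => decide (k ∉ l))) := by
  induction ws generalizing l a m with
  | nil => simp
  | cons k ws ih =>
    have hkw := (List.pairwise_cons.mp hw).1
    have hw' := (List.pairwise_cons.mp hw).2
    set l' := l.dropWhile (fun x => decide (x < k)) with hl'
    have hsub : l'.Pairwise (· < ·) := hl.sublist (List.dropWhile_sublist _)
    have hstep : pvStep ((a, m), pvNext l) k
        = (if k ∈ l then ((a + 1, m), pvNext l') else ((a, m ++ [k]), pvNext l')) := by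
      simp only [pvStep, pvSkipLt_toIter, ← hl']
      have hhead : (pvNext l').1 = l'.head? := by cases l' <;> rfl
      by_cases hm : k ∈ l
      · have : l'.head? = some k := (pvHead_dropWhile l hl k).mpr hm
        simp [hm, hhead, this]
      · have : l'.head? ≠ some k := fun e => hm ((pvHead_dropWhile l hl k).mp e)
        simp only [if_neg hm]
        have : ((pvNext l').1 == some k) = false := by
          rw [hhead]; simp [this]
        simp [this]
    have hcong : ∀ k' ∈ ws, (decide (k' ∈ l') = decide (k' ∈ l)) := by
      intro k' hk'
      rw [hl', decide_eq_decide]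
      exact pvMem_dropWhile l k k' (hkw k' hk')
    have hcount : ws.countP (fun k' => decide (k' ∈ l')) = ws.countP (fun k' => decide (k' ∈ l)) :=
      List.countP_congr (fun x hx => by rw [hcong x hx])
    have hfilter : ws.filter (fun k' => decide (k' ∉ l')) = ws.filter (fun k' => decide (k' ∉ l)) :=
      List.filter_congr (fun x hx => by
        have := hcong x hx
        simp only [decide_not]
        rw [this])
    rw [List.foldl_cons, hstep]
    by_cases hm : k ∈ l
    · rw [if_pos hm, ih l' (a + 1) m hw' hsub, hcount, hfilter]
      simp [hm]
      omega
    · rw [if_neg hm, ih l' a (m ++ [k]) hw' hsub, hcount, hfilter]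
      simp [hm]

-- a sorted Nodup Int list is strictly increasing
theorem pvSorted_strict (l : List Int) (hnd : l.Nodup) :
    (PySem.List.sorted l (fun k => k)).Pairwise (· < ·) := by
  have hsortnd : (PySem.List.sorted l (fun k => k)).Nodup :=
    (PySem.List.sorted_perm l (fun k => k) false).nodup_iff.mpr hnd
  have hle := PySem.List.sorted_pairwise l (fun k => k)
  exact (hle.and hsortnd).imp (fun h => lt_of_le_of_ne h.1 h.2)

-- ===== VERDICT (by name: the statement is the Claim_ definition above) =====
theorem preview_items_vs_scryfall_spec : Claim_equal_preview_items_vs_scryfall := by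
  intro items_dict cards _hdom hpre
  unfold Spec_preview_items_vs_scryfall preview_items_vs_scryfall preview_items_vs_scryfall_alt
  rw [pvBuild_eq]
  set D := (cards.filterMap (fun c => (pvCollectorNum c).map (fun n => (n, c)))).foldl
      (fun d p => d.insert p.1 p.2) PySem.Dict.empty with hD
  set ks := items_dict.map Prod.fst with hks
  -- strictly increasing sorted sequences on both sides
  have hwlt : (PySem.List.sorted ks (fun k => k)).Pairwise (· < ·) := pvSorted_strict ks hpre
  have hkeysnd : D.keys.Nodup := by
    rw [hD]
    exact PySem.Dict.nodup_keys_foldl_insert_key _ Prod.fst (fun _ p => p.2) _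
      PySem.Dict.nodup_keys_empty
  have hhlt : (PySem.List.sorted D.keys (fun k => k)).Pairwise (· < ·) :=
    pvSorted_strict D.keys hkeysnd
  -- both loops in closed form
  simp only [pvPairFold, pvScan _ _ _ _ hwlt hhlt]
  -- membership in sorted(D.keys) is D.contains
  have hmem : ∀ k : Int, (decide (k ∈ PySem.List.sorted D.keys (fun k => k))) = D.contains k := by
    intro k
    rw [PySem.Dict.contains_eq_decide_mem_keys]
    simp [PySem.List.mem_sorted]
  refine Prod.ext ?_ (Prod.ext ?_ rfl)
  · simp only []
    congr 2
    exact List.countP_congr (fun x _ => by rw [hmem x])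
  · simp only []
    congr 1
    exact List.filter_congr (fun x _ => by
      simp only [decide_not]
      rw [hmem x])
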